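-- pv_equiv track=rewrite | github.com/iuuuuuaena/CUG-Practice | OJ-Solution/Lintcode/lintcode956.py | dataSegmentation
-- ===== SOURCE A (Python) =====
-- def dataSegmentation(str):
--     length=len(str)
--     res=list()
--     i=0
--     while i<length:
--         if str[i]==' ':
--             i+=1
--             continue
--         elif str[i]>='a' and str[i]<='z':
--             temp=str[i]
--             i+=1
--             if i<length:
--                 while str[i]>='a' and str[i]<='z':
--                     temp=temp+str[i]
--                     i+=1
--                     if i>=length:
--                         break
--             res.append(temp)
--         else:
--             res.append(str[i])
--             i+=1
--     return res
-- ===== SOURCE B (Python) =====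
-- def dataSegmentation(str):
--     n = len(str)
--     cuts = [i for i in range(n + 1)
--             if i == 0 or i == n
--             or not ('a' <= str[i - 1] <= 'z' and 'a' <= str[i] <= 'z')]
--     return [str[a:b] for a, b in zip(cuts, cuts[1:]) if str[a] != ' ']
-- ===== Notes on version B (the rewrite author's own statement) =====
-- stated objective: faster
-- what changed: Replaces A's stateful index walk with an inner word-accumulating loop (temp = temp + str[i], a fresh copy per character) by a stateless two-stage computation: one comprehension lists all cut positions (boundaries where the two adjacent characters are not both lowercase), a second emits the slice between each pair of consecutive cuts, dropping the space chunks.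
import Mathlib
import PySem

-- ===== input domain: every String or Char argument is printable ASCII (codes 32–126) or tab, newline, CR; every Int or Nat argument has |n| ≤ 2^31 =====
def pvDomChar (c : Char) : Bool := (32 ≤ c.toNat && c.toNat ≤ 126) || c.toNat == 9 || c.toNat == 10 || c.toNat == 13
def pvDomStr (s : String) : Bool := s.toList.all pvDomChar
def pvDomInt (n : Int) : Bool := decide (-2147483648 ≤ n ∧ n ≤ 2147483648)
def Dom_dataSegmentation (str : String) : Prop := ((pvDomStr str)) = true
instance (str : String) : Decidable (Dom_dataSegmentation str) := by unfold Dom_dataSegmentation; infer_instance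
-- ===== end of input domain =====

-- B replaces A's stateful index walk (inner word-accumulating loop) by a stateless two-stage
-- computation: list all cut positions, then slice between consecutive cuts, dropping space chunks.


-- B replaces A's stateful index walk (inner word-accumulating loop) by a stateless two-stage
-- computation: list all cut positions, then slice between consecutive cuts, dropping space chunks.

-- ===== PORT A =====
-- inner 'while str[i]>='a' and str[i]<='z'' loop of A: consumes the maximal lowercase
-- run, returning (consumed chars in order, remaining suffix)
def pvTakeWordA : List Char → List Char × List Char
  | [] => ([], [])
  | c :: cs =>
    if 'a' ≤ c ∧ c ≤ 'z' then
      let p := pvTakeWordA cs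
      (c :: p.1, p.2)
    else ([], c :: cs)

theorem pvTakeWordA_len (cs : List Char) : (pvTakeWordA cs).2.length ≤ cs.length := by
  induction cs with
  | nil => simp [pvTakeWordA]
  | cons c cs ih =>
    simp only [pvTakeWordA]
    split
    · simpa using Nat.le_succ_of_le ih
    · simp

-- A's outer while loop over index i, as recursion on the remaining suffix
def pvGoA : List Char → List String
  | [] => []
  | c :: rest =>
    if c = ' ' then pvGoA rest
    else if 'a' ≤ c ∧ c ≤ 'z' then
      String.mk (c :: (pvTakeWordA rest).1) :: pvGoA (pvTakeWordA rest).2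
    else String.mk [c] :: pvGoA rest
termination_by cs => cs.length
decreasing_by
  · simp only [List.length_cons]; omega
  · have := pvTakeWordA_len rest; simp only [List.length_cons]; omega
  · simp only [List.length_cons]; omega

def dataSegmentation (str : String) : List String := pvGoA str.toList

-- ===== PORT B =====
-- 'cuts = [i for i in range(n+1) if i == 0 or i == n or not ('a'<=str[i-1]<='z' and 'a'<=str[i]<='z')]'
-- Python reaches str[i-1]/str[i] only when 0 < i < n (the 'or' short-circuits), so indexing
-- with a default character is exact on every evaluated index.

def pvCutsB (cs : List Char) : List Int :=
  (PySem.List.pyRange 0 ((cs.length : Int) + 1) 1).filter (fun i =>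
    i == 0 || i == (cs.length : Int) ||
      !(decide ('a' ≤ PySem.List.pyGetD cs (i-1) ' ' ∧ PySem.List.pyGetD cs (i-1) ' ' ≤ 'z') &&
        decide ('a' ≤ PySem.List.pyGetD cs i ' ' ∧ PySem.List.pyGetD cs i ' ' ≤ 'z')))


-- 'return [str[a:b] for a, b in zip(cuts, cuts[1:]) if str[a] != ' ']'

def dataSegmentation_alt (str : String) : List String :=
  (((pvCutsB str.toList).zip (PySem.List.slice (pvCutsB str.toList) (some 1) none)).filter
      (fun ab => PySem.List.pyGetD str.toList ab.1 ' ' != ' ')).map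
    (fun ab => String.mk (PySem.List.slice str.toList (some ab.1) (some ab.2)))


-- ===== PRECONDITION & SPEC =====
def Spec_dataSegmentation (str : String) (out : List String) : Prop := out = dataSegmentation_alt str
instance (str : String) (out : List String) : Decidable (Spec_dataSegmentation str out) := by unfold Spec_dataSegmentation; infer_instance

-- ===== CLAIM (what is proved, stated in full; the proofs are below) =====
def Claim_equal_dataSegmentation : Prop := ∀ (str : String), Dom_dataSegmentation str → Spec_dataSegmentation str (dataSegmentation str)

-- ===== LEMMAS AND PROOFS =====

-- common reference function: tokenize with a pending (all-lowercase) word buffer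

def pvK (buf : List Char) : List Char → List String
  | [] => if buf = [] then [] else [String.mk buf]
  | c :: cs =>
    if 'a' ≤ c ∧ c ≤ 'z' then pvK (buf ++ [c]) cs
    else
      (if buf = [] then [] else [String.mk buf]) ++
        (if c = ' ' then [] else [String.mk [c]]) ++ pvK [] cs


-- ---- A-side: pvGoA = pvK [] ----
theorem K_word (cs : List Char) : ∀ buf : List Char, buf ≠ [] →
    pvK buf cs = String.mk (buf ++ (pvTakeWordA cs).1) :: pvK [] (pvTakeWordA cs).2 := by
  induction cs with
  | nil => intro buf hb; simp [pvK, pvTakeWordA, hb]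
  | cons c cs ih =>
    intro buf hb
    simp only [pvK, pvTakeWordA]
    by_cases h : 'a' ≤ c ∧ c ≤ 'z'
    · simp only [h, if_true]
      rw [ih (buf ++ [c]) (by simp)]
      simp
    · simp [h, hb, pvK]

theorem goA_eq_K (cs : List Char) : pvGoA cs = pvK [] cs := by
  induction cs using pvGoA.induct with
  | case1 => simp [pvGoA, pvK]
  | case2 rest ih => simp [pvGoA, pvK, ih]
  | case3 c rest hs h ih =>
    rw [pvGoA, if_neg hs, if_pos h, pvK, if_pos h, show ([] : List Char) ++ [c] = [c] by simp,
      K_word rest [c] (by simp), ih]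
    simp
  | case4 c rest hs h ih =>
    simp [pvGoA, pvK, hs, h, ih]

-- ---- B-side: Nat-index reformulation ----

def pvLow (c : Char) : Bool := decide ('a' ≤ c ∧ c ≤ 'z')
def pvP (cs : List Char) (i : Nat) : Bool :=
  i == 0 || i == cs.length || !(pvLow (cs.getD (i-1) ' ') && pvLow (cs.getD i ' '))
def pvCutsN (cs : List Char) : List Nat := (List.range (cs.length+1)).filter (pvP cs)


def pvPT (C : List Nat) (cs : List Char) : List (List Char) :=
  (C.zip C.tail).map (fun ab => (cs.drop ab.1).take (ab.2 - ab.1))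

def pvTokN (cs : List Char) : List String :=
  (((pvCutsN cs).zip (pvCutsN cs).tail).filter (fun ab => cs.getD ab.1 ' ' != ' ')).map
    (fun ab => String.mk ((cs.drop ab.1).take (ab.2 - ab.1)))


theorem cutsB_eq_cutsN (cs : List Char) : pvCutsB cs = (pvCutsN cs).map (Nat.cast) := by
  unfold pvCutsB pvCutsN
  have hr : PySem.List.pyRange 0 ((cs.length : Int) + 1) 1
      = (List.range (cs.length + 1)).map (Nat.cast) := by
    rw [show ((cs.length : Int) + 1) = ((cs.length + 1 : Nat) : Int) by push_cast; ring]
    exact PySem.List.pyRange_zero_natCast (cs.length + 1)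
  rw [hr, List.filter_map]
  congr 1
  apply List.filter_congr
  intro i _
  simp only [Function.comp]
  by_cases h0 : i = 0
  · subst h0; simp [pvP]
  · have hne0' : (i == 0) = false := by simp [h0]
    have heq : ((i : Int) == (cs.length : Int)) = (i == cs.length) := by
      cases h : i == cs.length
      · simp only [beq_eq_false_iff_ne] at h ⊢; exact_mod_cast h
      · simp only [beq_iff_eq] at h; simp [h]
    have hsub : ((i : Int) - 1) = ((i - 1 : Nat) : Int) := by
      have : 1 ≤ i := Nat.one_le_iff_ne_zero.mpr h0
      push_cast [this]; ring
    rw [heq, hsub, PySem.List.pyGetD_natCast, PySem.List.pyGetD_natCast]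
    have hne0 : ((i : Int) == 0) = false := by simp [h0]
    simp [pvP, pvLow, hne0', hne0]

theorem alt_eq_tokN (str : String) : dataSegmentation_alt str = pvTokN str.toList := by
  unfold dataSegmentation_alt pvTokN
  set cs := str.toList with hcs
  rw [cutsB_eq_cutsN]
  rw [show PySem.List.slice ((pvCutsN cs).map Nat.cast) (some 1) none
        = ((pvCutsN cs).map Nat.cast).tail by
      rw [PySem.List.slice_from _ (by norm_num : (0:Int) ≤ 1)]
      simp [List.drop_one]]
  rw [← List.map_tail, List.zip_map]
  rw [List.filter_map, List.map_map]
  have hfc : ∀ ab ∈ (pvCutsN cs).zip (pvCutsN cs).tail,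
      ((fun p => (PySem.List.pyGetD cs p.1 ' ' != ' ')) ∘ (Prod.map (Nat.cast : Nat → Int) (Nat.cast : Nat → Int))) ab
        = (cs.getD ab.1 ' ' != ' ') := by
    intro ab _
    simp only [Function.comp, Prod.map]
    rw [PySem.List.pyGetD_natCast]
  rw [List.filter_congr hfc]
  apply List.map_congr_left
  intro ab hab
  simp only [Function.comp, Prod.map]
  simp [PySem.List.slice_toNat]


-- ---- cut-list recurrence ----

theorem cutsN_base (cs : List Char) :
    pvCutsN cs = 0 :: List.filter (pvP cs) ((List.range cs.length).map Nat.succ) := by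
  unfold pvCutsN
  rw [List.range_succ_eq_map, List.filter_cons_of_pos (by simp [pvP])]

theorem cutsN_head (cs : List Char) : pvCutsN cs = 0 :: (pvCutsN cs).tail := by
  rw [cutsN_base]; rfl

theorem pvPT_shift (C : List Nat) (c : Char) (cs : List Char) :
    pvPT (C.map Nat.succ) (c :: cs) = pvPT C cs := by
  unfold pvPT
  rw [← List.map_tail, List.zip_map, List.map_map]
  apply List.map_congr_left
  intro ab _
  simp [Nat.succ_sub_succ]

theorem cutsN_rec (c : Char) (cs : List Char) :
    pvCutsN (c :: cs) =
      0 :: ((if cs = [] ∨ pvLow c = false ∨ pvLow (cs.headD ' ') = false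
              then pvCutsN cs else (pvCutsN cs).tail).map Nat.succ) := by
  have hcong : List.filter (fun i => pvP (c :: cs) (i+1)) ((List.range cs.length).map Nat.succ)
      = List.filter (pvP cs) ((List.range cs.length).map Nat.succ) := by
    apply List.filter_congr
    intro j hj
    simp only [List.mem_map] at hj
    obtain ⟨i, _, rfl⟩ := hj
    simp only [pvP, List.length_cons]
    have h3 : (i.succ + 1 == cs.length + 1) = (i.succ == cs.length) := by
      cases h : i.succ == cs.length <;> simp_all
    have h4 : (c :: cs).getD (i.succ + 1 - 1) ' ' = cs.getD (i.succ - 1) ' ' := by simp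
    have h5 : (c :: cs).getD (i.succ + 1) ' ' = cs.getD i.succ ' ' := by simp
    rw [h3, h4, h5]
    simp
  have h1 : pvCutsN (c :: cs) =
      0 :: ((List.range (cs.length+1)).filter (fun i => pvP (c :: cs) (i+1))).map Nat.succ := by
    unfold pvCutsN
    rw [show (c :: cs).length + 1 = (cs.length+1)+1 from by simp, List.range_succ_eq_map,
        List.filter_cons_of_pos (by simp [pvP]), List.filter_map]
    rfl
  have h2 : (List.range (cs.length+1)).filter (fun i => pvP (c :: cs) (i+1)) =
      (if cs = [] ∨ pvLow c = false ∨ pvLow (cs.headD ' ') = false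
        then pvCutsN cs else (pvCutsN cs).tail) := by
    rw [List.range_succ_eq_map, List.filter_cons, hcong]
    by_cases hq : cs = [] ∨ pvLow c = false ∨ pvLow (cs.headD ' ') = false
    · have hp1 : pvP (c :: cs) (0 + 1) = true := by
        rcases hq with h | h | h
        · subst h; simp [pvP]
        · simp [pvP, h]
        · cases cs with
          | nil => simp [pvP]
          | cons d t => simp_all [pvP]
      rw [if_pos hp1, if_pos hq, cutsN_base]
    · push_neg at hq
      obtain ⟨hne, hc, hd⟩ := hq
      have hp1 : ¬ (pvP (c :: cs) (0 + 1) = true) := by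
        cases cs with
        | nil => exact absurd rfl hne
        | cons d t =>
          simp only [pvP, List.length_cons, List.headD_cons] at hc hd ⊢
          simp_all
      rw [if_neg hp1, if_neg (by push_neg; exact ⟨hne, hc, hd⟩), cutsN_base]; rfl
  rw [h1, h2]


-- ---- chunk machinery ----

def pvCh (buf : List Char) : List Char → List (List Char)
  | [] => if buf = [] then [] else [buf]
  | c :: cs =>
    if 'a' ≤ c ∧ c ≤ 'z' then pvCh (buf ++ [c]) cs
    else (if buf = [] then [] else [buf]) ++ [[c]] ++ pvCh [] cs

theorem pvCh_extend (cs : List Char) : ∀ buf1 buf2 : List Char,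
    (buf2 ≠ [] ∨ ∃ d t, cs = d :: t ∧ ('a' ≤ d ∧ d ≤ 'z')) →
    pvCh (buf1 ++ buf2) cs = (buf1 ++ (pvCh buf2 cs).headD []) :: (pvCh buf2 cs).tail := by
  induction cs with
  | nil =>
    intro buf1 buf2 h
    have hb : buf2 ≠ [] := by rcases h with h | ⟨d, t, ht, _⟩; exact h; exact absurd ht (by simp)
    simp [pvCh, hb]
  | cons c cs ih =>
    intro buf1 buf2 h
    by_cases hc : 'a' ≤ c ∧ c ≤ 'z'
    · simp only [pvCh, if_pos hc, List.append_assoc]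
      exact ih buf1 (buf2 ++ [c]) (Or.inl (by simp))
    · have hb : buf2 ≠ [] := by
        rcases h with h | ⟨d, t, ht, hd⟩
        · exact h
        · cases ht; exact absurd hd hc
      simp [pvCh, hc, hb]

theorem mem_pvCutsN_length (cs : List Char) : cs.length ∈ pvCutsN cs := by
  unfold pvCutsN
  rw [List.mem_filter]
  constructor
  · simp [List.mem_range]
  · simp [pvP]

theorem pvPT_cuts_eq_ch (cs : List Char) : pvPT (pvCutsN cs) cs = pvCh [] cs := by
  induction cs with
  | nil =>
    have : pvCutsN [] = [0] := by decide
    simp [this, pvPT, pvCh]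
  | cons c cs ih =>
    rw [cutsN_rec]
    by_cases hq : cs = [] ∨ pvLow c = false ∨ pvLow (cs.headD ' ') = false
    · rw [if_pos hq]
      rw [cutsN_head cs]
      set T := (pvCutsN cs).tail with hT
      -- cuts = 0 :: 1 :: map succ T ; first chunk [c]; rest shifts
      have hstep : pvPT (0 :: (0 :: T).map Nat.succ) (c :: cs) = [c] :: pvPT (pvCutsN cs) cs := by
        show pvPT (0 :: 1 :: T.map Nat.succ) (c :: cs) = _
        have h2 : pvPT (0 :: 1 :: T.map Nat.succ) (c :: cs)
            = ((c :: cs).drop 0).take 1 :: pvPT (1 :: T.map Nat.succ) (c :: cs) := rfl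
        rw [h2]
        have h3 : pvPT (1 :: T.map Nat.succ) (c :: cs) = pvPT ((0 :: T).map Nat.succ) (c :: cs) := rfl
        rw [h3, pvPT_shift, ← cutsN_head cs]
        simp
      rw [hstep, ih]
      -- now RHS side
      by_cases hc : 'a' ≤ c ∧ c ≤ 'z'
      · have hql : cs = [] ∨ pvLow (cs.headD ' ') = false := by
          rcases hq with h | h | h
          · exact Or.inl h
          · exact absurd h (by simp [pvLow, hc])
          · exact Or.inr h
        cases cs with
        | nil => simp [pvCh, hc]
        | cons d t =>
          have hd : ¬ ('a' ≤ d ∧ d ≤ 'z') := by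
            rcases hql with h | h
            · exact absurd h (by simp)
            · simp only [List.headD_cons, pvLow] at h
              exact of_decide_eq_false h
          simp [pvCh, hc, hd]
      · simp [pvCh, hc]
    · rw [if_neg hq]
      push_neg at hq
      obtain ⟨hne, hcl, hdl⟩ := hq
      have hc : 'a' ≤ c ∧ c ≤ 'z' := by
        by_contra hh; exact hcl (by simp [pvLow, hh])
      obtain ⟨d, t, rfl⟩ : ∃ d t, cs = d :: t := by
        cases cs with | nil => exact absurd rfl hne | cons d t => exact ⟨d, t, rfl⟩
      have hd : 'a' ≤ d ∧ d ≤ 'z' := by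
        have h1 : pvLow ((d :: t).headD ' ') = true := Bool.ne_false_iff.mp hdl
        simp only [List.headD_cons, pvLow] at h1
        exact of_decide_eq_true h1
      -- T nonempty
      have hmem : (d :: t).length ∈ pvCutsN (d :: t) := mem_pvCutsN_length _
      rw [cutsN_head (d :: t)] at hmem
      have hmem' : (d :: t).length ∈ (pvCutsN (d :: t)).tail := by
        rcases List.mem_cons.mp hmem with h | h
        · simp at h
        · exact h
      obtain ⟨b, T', hT⟩ : ∃ b T', (pvCutsN (d :: t)).tail = b :: T' := by
        cases h : (pvCutsN (d :: t)).tail with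
        | nil => rw [h] at hmem'; cases hmem'
        | cons b T' => exact ⟨b, T', rfl⟩
      rw [hT]
      have hcuts : pvCutsN (d :: t) = 0 :: b :: T' := by rw [cutsN_head (d :: t), hT]
      -- LHS
      have hL : pvPT (0 :: (b :: T').map Nat.succ) (c :: d :: t)
          = (c :: (d :: t).take b) :: pvPT (b :: T') (d :: t) := by
        show pvPT (0 :: (b+1) :: T'.map Nat.succ) (c :: d :: t) = _
        have h2 : pvPT (0 :: (b+1) :: T'.map Nat.succ) (c :: d :: t)
            = ((c :: d :: t).drop 0).take (b+1) :: pvPT ((b+1) :: T'.map Nat.succ) (c :: d :: t) := rfl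
        rw [h2]
        have h3 : pvPT ((b+1) :: T'.map Nat.succ) (c :: d :: t)
            = pvPT ((b :: T').map Nat.succ) (c :: d :: t) := rfl
        rw [h3, pvPT_shift]
        simp
      rw [hL]
      -- IH gives pvCh [] (d::t) = take b (d::t) :: pvPT (b::T') (d::t)
      have hih : (d :: t).take b :: pvPT (b :: T') (d :: t) = pvCh [] (d :: t) := by
        rw [← ih, hcuts]
        rfl
      -- RHS: pvCh [] (c::d::t) = pvCh [c] (d::t), extend
      have hR : pvCh [] (c :: d :: t) = pvCh ([c] ++ []) (d :: t) := by simp [pvCh, hc]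
      rw [hR, pvCh_extend (d :: t) [c] [] (Or.inr ⟨d, t, rfl, hd⟩), ← hih]
      simp


-- ---- pvK vs chunks, and assembling B ----

theorem low_ne_space {x : Char} (h : pvLow x = true) : (x != ' ') = true := by
  have hx := of_decide_eq_true h
  have : x ≠ ' ' := by rintro rfl; exact absurd hx.1 (by decide)
  simpa using this

theorem K_eq_ch (cs : List Char) : ∀ buf : List Char, (buf = [] ∨ pvLow (buf.headD ' ') = true) →
    pvK buf cs = ((pvCh buf cs).filter (fun t => t.headD ' ' != ' ')).map (fun t => String.mk t) := by
  induction cs with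
  | nil =>
    intro buf h
    rcases h with rfl | h
    · simp [pvK, pvCh]
    · by_cases hb : buf = []
      · simp [pvK, pvCh, hb]
      · cases buf with
        | nil => exact absurd rfl hb
        | cons b bs =>
          have hbne := low_ne_space (show pvLow b = true by simpa using h)
          simp [pvK, pvCh, hbne]
  | cons c cs ih =>
    intro buf h
    by_cases hc : 'a' ≤ c ∧ c ≤ 'z'
    · simp only [pvK, pvCh, if_pos hc]
      apply ih
      right
      cases buf with
      | nil => simpa [pvLow] using hc
      | cons b bs =>
        rcases h with h | h
        · cases h
        · simpa using h
    · simp only [pvK, pvCh, if_neg hc]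
      rw [List.filter_append, List.filter_append, List.map_append, List.map_append]
      congr 1
      · congr 1
        · rcases h with rfl | h
          · simp
          · cases buf with
            | nil => simp
            | cons b bs =>
              have hbne := low_ne_space (show pvLow b = true by simpa using h)
              simp [hbne]
        · by_cases hs : c = ' '
          · subst hs; simp
          · have : (c != ' ') = true := by simpa using hs
            simp [hs, this]
      · exact ih [] (Or.inl rfl)

theorem zip_tail_lt : ∀ (C : List Nat), C.Pairwise (· < ·) →
    ∀ ab ∈ C.zip C.tail, ab.1 < ab.2 := by
  intro C
  induction C with
  | nil => intro _ ab hab; cases hab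
  | cons a C ih =>
    intro hp ab hab
    cases C with
    | nil => cases hab
    | cons b C' =>
      rcases List.mem_cons.mp hab with rfl | h
      · exact (List.pairwise_cons.mp hp).1 b (by simp)
      · exact ih (List.pairwise_cons.mp hp).2 ab h

theorem mem_cutsN_le (cs : List Char) (x : Nat) (hx : x ∈ pvCutsN cs) : x ≤ cs.length := by
  unfold pvCutsN at hx
  have := (List.mem_filter.mp hx).1
  simpa [Nat.lt_succ_iff] using List.mem_range.mp this

theorem tokN_eq_K (cs : List Char) : pvTokN cs = pvK [] cs := by
  rw [K_eq_ch cs [] (Or.inl rfl), ← pvPT_cuts_eq_ch]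
  unfold pvTokN pvPT
  have hpw : (pvCutsN cs).Pairwise (· < ·) := List.Pairwise.filter _ (List.pairwise_lt_range)
  have hkey : ∀ ab ∈ (pvCutsN cs).zip (pvCutsN cs).tail,
      (cs.getD ab.1 ' ' != ' ') = (((cs.drop ab.1).take (ab.2 - ab.1)).headD ' ' != ' ') := by
    intro ab hab
    have hlt : ab.1 < ab.2 := zip_tail_lt _ hpw ab hab
    have h2 : ab.2 ≤ cs.length := by
      apply mem_cutsN_le
    -- ab.2 ∈ tail ⊆ cuts
      have := (List.of_mem_zip hab).2
      exact List.mem_of_mem_tail this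
    have h1 : ab.1 < cs.length := lt_of_lt_of_le hlt h2
    have hdrop : cs.drop ab.1 = cs[ab.1] :: cs.drop (ab.1 + 1) := List.drop_eq_getElem_cons h1
    have htake : (cs.drop ab.1).take (ab.2 - ab.1) = cs[ab.1] :: (cs.drop (ab.1+1)).take (ab.2 - ab.1 - 1) := by
      rw [hdrop]
      have hsub : ab.2 - ab.1 = (ab.2 - ab.1 - 1) + 1 := by omega
      rw [hsub, List.take_succ_cons]; simp
    rw [htake]
    simp [List.getD_eq_getElem?_getD, h1]
  rw [List.filter_congr hkey, List.filter_map, List.map_map]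
  rfl


-- ===== VERDICT (by name: the statement is the Claim_ definition above) =====
theorem dataSegmentation_spec : Claim_equal_dataSegmentation := by
  intro str _
  unfold Spec_dataSegmentation dataSegmentation
  rw [goA_eq_K, alt_eq_tokN, tokN_eq_K]
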